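-- pv_equiv track=rewrite | github.com/Phanuruj3146/KMITL | Year3/Cloud/db/primocalc.py | worsecase
-- ===== SOURCE A (Python) =====
-- def worsecase(fivestars,guarantee):
--     primoneed = 0
--     for i in range(fivestars):
--         if guarantee == True:
--             primoneed += 90*160
--             guarantee = False
--         else:
--             primoneed += 180*160
--             guarantee = True
--     return primoneed
-- ===== SOURCE B (Python) =====
-- def worsecase(fivestars, guarantee):
--     n = max(fivestars, 0)
--     if guarantee:
--         return 14400 * ((n + 1) // 2) + 28800 * (n // 2)
--     return 28800 * ((n + 1) // 2) + 14400 * (n // 2)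
-- ===== Notes on version B (the rewrite author's own statement) =====
-- stated objective: faster
-- what changed: Replaced the per-iteration alternating loop with an O(1) closed form counting how many iterations add 90*160 (ceil or floor of n/2 depending on guarantee) and how many add 180*160.
import Mathlib
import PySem

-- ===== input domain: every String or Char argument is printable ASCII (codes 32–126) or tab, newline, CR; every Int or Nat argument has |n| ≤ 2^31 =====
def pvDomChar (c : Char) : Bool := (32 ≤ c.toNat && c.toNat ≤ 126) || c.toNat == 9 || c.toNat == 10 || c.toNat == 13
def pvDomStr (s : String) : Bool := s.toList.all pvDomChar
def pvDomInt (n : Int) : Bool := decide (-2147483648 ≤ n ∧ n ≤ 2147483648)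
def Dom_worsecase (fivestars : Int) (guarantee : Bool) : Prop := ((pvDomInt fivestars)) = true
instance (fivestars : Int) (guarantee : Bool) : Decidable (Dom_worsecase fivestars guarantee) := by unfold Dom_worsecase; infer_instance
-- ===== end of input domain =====

-- B replaces A's O(n) alternating loop by an O(1) closed form (count of 90*160 vs 180*160 additions).

-- ===== PORT A =====
-- literal port: for i in range(fivestars), alternate adding 90*160 / 180*160, toggling guarantee
def worsecase (fivestars : Int) (guarantee : Bool) : Int :=
  let st := (PySem.List.pyRange 0 fivestars 1).foldl
    (fun (s : Int × Bool) _ =>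
      if s.2 == true then (s.1 + 90 * 160, false) else (s.1 + 180 * 160, true))
    (0, guarantee)
  st.1

-- ===== PORT B =====
def worsecase_alt (fivestars : Int) (guarantee : Bool) : Int :=
  let n := max fivestars 0
  if guarantee then
    14400 * PySem.Int.floordiv (n + 1) 2 + 28800 * PySem.Int.floordiv n 2
  else
    28800 * PySem.Int.floordiv (n + 1) 2 + 14400 * PySem.Int.floordiv n 2

-- ===== PRECONDITION & SPEC =====
def Spec_worsecase (fivestars : Int) (guarantee : Bool) (out : Int) : Prop := out = worsecase_alt fivestars guarantee
instance (fivestars : Int) (guarantee : Bool) (out : Int) : Decidable (Spec_worsecase fivestars guarantee out) := by unfold Spec_worsecase; infer_instance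

-- ===== CLAIM (what is proved, stated in full; the proofs are below) =====
def Claim_equal_worsecase : Prop := ∀ (fivestars : Int) (guarantee : Bool), Dom_worsecase fivestars guarantee → Spec_worsecase fivestars guarantee (worsecase fivestars guarantee)

-- ===== LEMMAS AND PROOFS =====

-- closed form for k loop iterations starting with flag g
def pvF (g : Bool) (k : Nat) : Int :=
  if g then 14400 * (((k + 1) / 2 : Nat) : Int) + 28800 * ((k / 2 : Nat) : Int)
  else 28800 * (((k + 1) / 2 : Nat) : Int) + 14400 * ((k / 2 : Nat) : Int)

lemma pvF_step (g : Bool) (k : Nat) :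
    (if g then (14400 : Int) else 28800) + pvF (!g) k = pvF g (k + 1) := by
  cases g <;> simp only [pvF, Bool.not_true, Bool.not_false, if_true] <;>
    push_cast <;> omega

lemma loop_eq (l : List Int) (a : Int) (g : Bool) :
    (l.foldl
      (fun (s : Int × Bool) _ =>
        if s.2 == true then (s.1 + 90 * 160, false) else (s.1 + 180 * 160, true))
      (a, g)).1 = a + pvF g l.length := by
  induction l generalizing a g with
  | nil => cases g <;> simp [pvF]
  | cons x l ih =>
    cases g with
    | true =>
      have hs := pvF_step true l.length
      simp only [Bool.not_true] at hs
      simp only [List.foldl_cons]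
      norm_num
      norm_num at ih hs
      rw [(ih (a + 14400)).1]
      linarith
    | false =>
      have hs := pvF_step false l.length
      simp only [Bool.not_false] at hs
      simp only [List.foldl_cons]
      norm_num
      norm_num at ih hs
      rw [(ih (a + 28800)).2]
      linarith

theorem worsecase_spec : Claim_equal_worsecase := by
  intro fivestars guarantee _
  unfold Spec_worsecase worsecase worsecase_alt
  simp only []
  rw [loop_eq]
  rw [PySem.List.length_pyRange_one]
  have hn : max fivestars 0 = ((fivestars - 0).toNat : Int) := by omega
  rw [hn]
  have h1 : PySem.Int.floordiv (((fivestars - 0).toNat : Int) + 1) 2 = (((fivestars - 0).toNat : Int) + 1) / 2 :=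
    PySem.Int.floordiv_eq_ediv_of_pos (by omega)
  have h2 : PySem.Int.floordiv (((fivestars - 0).toNat : Int)) 2 = (((fivestars - 0).toNat : Int)) / 2 :=
    PySem.Int.floordiv_eq_ediv_of_pos (by omega)
  rw [h1, h2]
  cases guarantee <;> simp only [pvF, if_true] <;> push_cast <;> omega
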